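-- pv_equiv track=rewrite | github.com/ColinPhilipJohnstone/LingQReader | Reader.py | GetBasicWord
-- ===== SOURCE A (Python) =====
-- import copy
--
-- def GetBasicWord(string):
--
--   """Takes string with word, returns string with punctuation removed and lowercase."""
--
--   # Make sure there is at least one real letter in word and return -1 if not
--   isWord = False
--   for char in string:
--     if char.isalpha():
--       isWord = True
--   if not isWord:
--     return -1
--
--   # Make deep copy of string
--   word = copy.deepcopy(string)
--
--   # Make word lower case
--   word = word.lower()
--
--   # Check if need to shave characters off edges
--   if not ( word[0].isalpha() and word[-1].isalpha() ):
--
--     # Loop forward and get first letter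
--     for i in range(0,len(word),1):
--       if word[i].isalpha():
--         iStart = i
--         break
--
--     # Loop backwards and get last letter
--     for i in range(len(word)-1,-1,-1):
--       if word[i].isalpha():
--         iEnd = i
--         break
--
--     # Get new word
--     word = word[iStart:iEnd+1]
--
--   return word
-- ===== SOURCE B (Python) =====
-- def GetBasicWord(string):
--   """Takes string with word, returns string with punctuation removed and lowercase."""
--   word = string.lower()
--   # Peel non-letter characters off the back, then off the front.
--   while word and not word[-1].isalpha():
--     word = word[:-1]
--   while word and not word[0].isalpha():
--     word = word[1:]
--   return word if word else -1
-- ===== Notes on version B (the rewrite author's own statement) =====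
-- stated objective: idiomatic
-- what changed: Replaces A's existence pass plus first/last-alpha index scans and slicing by peeling non-letter characters directly off the ends of the lowered string, with the empty remainder signalling -1; Pre_ excludes letter-free strings, where both return the out-of-type integer -1.
-- outside the precondition, e.g. on GetBasicWord('123!'): A returns -1, B returns -1; on GetBasicWord(''): A returns -1, B returns -1
import Mathlib
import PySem

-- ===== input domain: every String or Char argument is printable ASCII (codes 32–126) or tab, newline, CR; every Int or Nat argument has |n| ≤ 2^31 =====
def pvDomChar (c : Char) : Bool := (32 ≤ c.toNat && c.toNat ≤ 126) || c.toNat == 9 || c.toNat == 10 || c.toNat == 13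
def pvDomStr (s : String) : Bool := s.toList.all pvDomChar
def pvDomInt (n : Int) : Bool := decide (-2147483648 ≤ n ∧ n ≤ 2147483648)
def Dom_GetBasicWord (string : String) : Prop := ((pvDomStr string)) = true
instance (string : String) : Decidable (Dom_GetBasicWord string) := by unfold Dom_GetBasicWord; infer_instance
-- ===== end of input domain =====

-- B lowercases then peels non-letters off both ends instead of A's existence pass + index scans + slice;
-- return value only: Python's -1 (no letter in the input) is modelled as `none`.

-- ===== PORT A =====
-- 'isWord' loop: for char in string: if char.isalpha(): isWord = True
def pvFoldAlpha (cs : List Char) : Bool :=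
  cs.foldl (fun acc c => if PySem.Chars.isalpha c then true else acc) false

-- forward loop 'for i in range(0,len(word),1): if word[i].isalpha(): iStart = i; break'
def pvFirstAlpha (cs : List Char) (i : Nat) : Option Nat :=
  match cs with
  | [] => none
  | c :: rest => if PySem.Chars.isalpha c then some i else pvFirstAlpha rest (i + 1)

-- backward loop 'for i in range(len(word)-1,-1,-1): if word[i].isalpha(): iEnd = i; break'
def pvLastAlpha (word : List Char) : Nat → Option Nat
  | 0 =>
    match word[0]? with
    | some c => if PySem.Chars.isalpha c then some 0 else none
    | none => none
  | i + 1 =>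
    match word[i + 1]? with
    | some c => if PySem.Chars.isalpha c then some (i + 1) else pvLastAlpha word i
    | none => pvLastAlpha word i

def GetBasicWord (string : String) : Option String :=
  let cs := string.toList
  if pvFoldAlpha cs = false then none          -- Python: return -1
  else
    let word := PySem.Chars.lower cs
    match PySem.List.pyGet? word 0, PySem.List.pyGet? word (-1) with
    | some c0, some c1 =>
      if !(PySem.Chars.isalpha c0 && PySem.Chars.isalpha c1) then
        match pvFirstAlpha word 0, pvLastAlpha word (word.length - 1) with
        | some iStart, some iEnd =>
          some (String.ofList (PySem.List.slice word (some (iStart : Int)) (some ((iEnd : Int) + 1))))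
        | _, _ => none                         -- Python: NameError (unreachable: a letter exists)
      else some (String.ofList word)
    | _, _ => none                             -- Python: IndexError (unreachable: word nonempty)

-- ===== PORT B =====
-- 'while word and not word[-1].isalpha(): word = word[:-1]'
def pvPeelBack (w : List Char) : List Char :=
  if h : w = [] then w
  else if PySem.Chars.isalpha (w.getLast h) then w
  else pvPeelBack w.dropLast
termination_by w.length
decreasing_by simpa using Nat.sub_lt (List.length_pos_iff.mpr h) Nat.one_pos

-- 'while word and not word[0].isalpha(): word = word[1:]'
def pvPeelFront : List Char → List Char
  | [] => []
  | c :: cs => if PySem.Chars.isalpha c then c :: cs else pvPeelFront cs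

def GetBasicWord_alt (string : String) : Option String :=
  let word := pvPeelFront (pvPeelBack (PySem.Chars.lower string.toList))
  if word = [] then none else some (String.ofList word)

-- ===== PRECONDITION & SPEC =====
-- Pre_ excludes strings containing no alphabetic character: there Python A returns the integer -1,
-- a value outside the declared Optional[str] return type (and Python B does the same).
def Pre_GetBasicWord (string : String) : Prop :=
  string.toList.any PySem.Chars.isalpha = true
instance (string : String) : Decidable (Pre_GetBasicWord string) := by unfold Pre_GetBasicWord; infer_instance
def pvWitness_GetBasicWord : String := " Hi! "

def Spec_GetBasicWord (string : String) (out : Option String) : Prop := out = GetBasicWord_alt string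
instance (string : String) (out : Option String) : Decidable (Spec_GetBasicWord string out) := by unfold Spec_GetBasicWord; infer_instance

-- ===== CLAIM (what is proved, stated in full; the proofs are below) =====
def Claim_equal_GetBasicWord : Prop := ∀ (string : String), Dom_GetBasicWord string → Pre_GetBasicWord string → Spec_GetBasicWord string (GetBasicWord string)

-- ===== LEMMAS AND PROOFS =====

theorem isalpha_lowerChar (c : Char) : PySem.Chars.isalpha (PySem.Chars.lowerChar c) = PySem.Chars.isalpha c := by
  simp only [PySem.Chars.isalpha, PySem.Chars.lowerChar, PySem.Chars.isupper, PySem.Chars.islower]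
  split_ifs with h
  · simp only [Bool.and_eq_true, decide_eq_true_eq, Char.le_def, UInt32.le_iff_toNat_le] at h ⊢
    obtain ⟨h1, h2⟩ := h
    have e1 : 'A'.val.toNat = 65 := by decide
    have e2 : 'Z'.val.toNat = 90 := by decide
    have e3 : 'a'.val.toNat = 97 := by decide
    have e4 : 'z'.val.toNat = 122 := by decide
    rw [e1] at h1; rw [e2] at h2
    have ht : (Char.ofNat (c.toNat + 32)).val.toNat = c.val.toNat + 32 := by
      show (Char.ofNat (c.toNat + 32)).toNat = _
      rw [Char.toNat_ofNat, if_pos]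
      · rfl
      · simp only [Nat.isValidChar]
        left; unfold Char.toNat at *; omega
    rw [ht, e1, e2, e3, e4]
    rw [decide_eq_true (show (97:Nat) ≤ c.val.toNat + 32 by omega),
        decide_eq_true (show c.val.toNat + 32 ≤ 122 by omega),
        decide_eq_true h1, decide_eq_true h2]
    simp
  · rfl

theorem pvFoldAlpha_aux (cs : List Char) (b : Bool) :
    cs.foldl (fun acc c => if PySem.Chars.isalpha c then true else acc) b
      = (b || cs.any PySem.Chars.isalpha) := by
  induction cs generalizing b with
  | nil => simp
  | cons c rest ih =>
    rw [List.foldl_cons, ih, List.any_cons]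
    by_cases hc : PySem.Chars.isalpha c <;> simp [hc]

theorem pvFoldAlpha_eq (cs : List Char) : pvFoldAlpha cs = cs.any PySem.Chars.isalpha := by
  rw [pvFoldAlpha, pvFoldAlpha_aux, Bool.false_or]

theorem any_lower (cs : List Char) :
    (PySem.Chars.lower cs).any PySem.Chars.isalpha = cs.any PySem.Chars.isalpha := by
  simp [PySem.Chars.lower, List.any_map, Function.comp_def, isalpha_lowerChar]

theorem pvPeelFront_eq (w : List Char) :
    pvPeelFront w = w.dropWhile (fun c => !PySem.Chars.isalpha c) := by
  induction w with
  | nil => rfl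
  | cons c rest ih =>
    by_cases hc : PySem.Chars.isalpha c <;> simp [pvPeelFront, hc, ih]

theorem pvPeelBack_eq (w : List Char) :
    pvPeelBack w = w.rdropWhile (fun c => !PySem.Chars.isalpha c) := by
  induction w using List.reverseRecOn with
  | nil => simp [pvPeelBack, List.rdropWhile_nil]
  | append_singleton xs x ih =>
    rw [pvPeelBack]
    have hne : xs ++ [x] ≠ [] := by simp
    rw [dif_neg hne]
    simp only [List.getLast_concat]
    by_cases hx : PySem.Chars.isalpha x
    · rw [if_pos hx, List.rdropWhile_concat_neg _ _ _ (by simp [hx])]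
    · rw [if_neg hx, List.dropLast_concat, ih, List.rdropWhile_concat_pos _ _ _ (by simp [hx])]

theorem pvFirstAlpha_eq (w : List Char) (i : Nat) :
    pvFirstAlpha w i = (if w.any PySem.Chars.isalpha
      then some (i + (w.takeWhile (fun c => !PySem.Chars.isalpha c)).length) else none) := by
  induction w generalizing i with
  | nil => simp [pvFirstAlpha]
  | cons c rest ih =>
    by_cases hc : PySem.Chars.isalpha c
    · simp [pvFirstAlpha, hc]
    · have hc' : PySem.Chars.isalpha c = false := by simpa using hc
      by_cases h : rest.any PySem.Chars.isalpha
      · simp [pvFirstAlpha, hc', ih, h]; omega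
      · simp [pvFirstAlpha, hc', ih, h]

theorem pvLastAlpha_eq (w : List Char) (j : Nat) (hj : j < w.length) :
    pvLastAlpha w j = (if (w.take (j+1)).any PySem.Chars.isalpha
      then some (j - ((w.take (j+1)).reverse.takeWhile (fun c => !PySem.Chars.isalpha c)).length)
      else none) := by
  induction j with
  | zero =>
    have h0 : w[0]? = some (w[0]'hj) := List.getElem?_eq_getElem hj
    have ht1 : w.take (0+1) = [w[0]'hj] := by
      rw [List.take_add_one (l := w) (i := 0)]
      simp [h0]
    rw [pvLastAlpha, h0, ht1]
    by_cases hc : PySem.Chars.isalpha (w[0]'hj) <;> simp [hc]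
  | succ i ihi =>
    have hlt : i + 1 < w.length := hj
    have hg : w[i+1]? = some (w[i+1]'hlt) := List.getElem?_eq_getElem hlt
    have htk : w.take (i+1+1) = w.take (i+1) ++ [w[i+1]'hlt] := by
      rw [List.take_add_one (l := w) (i := i+1)]
      simp [hg]
    rw [pvLastAlpha, hg]
    dsimp only
    by_cases hc : PySem.Chars.isalpha (w[i+1]'hlt)
    · rw [if_pos hc, htk]
      have hx : (w.take (i+1) ++ [w[i+1]'hlt]).any PySem.Chars.isalpha = true := by
        rw [List.any_append]; simp [hc]
      rw [if_pos hx, List.reverse_append]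
      have hq : (!PySem.Chars.isalpha (w[i+1]'hlt)) = false := by simp [hc]
      rw [show ([w[i+1]'hlt].reverse ++ (w.take (i+1)).reverse)
            = (w[i+1]'hlt) :: (w.take (i+1)).reverse from by simp]
      rw [List.takeWhile_cons, hq]
      simp
    · have hc' : PySem.Chars.isalpha (w[i+1]'hlt) = false := by simpa using hc
      rw [if_neg hc, ihi (by omega), htk]
      simp only [List.any_append, List.any_cons, List.any_nil, hc', Bool.or_false,
        List.reverse_append, List.reverse_cons, List.reverse_nil, List.nil_append,
        List.cons_append, List.takeWhile_cons, Bool.not_false, if_true,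
        List.length_cons]
      split_ifs with h
      · congr 1; omega
      · rfl

theorem my_dropWhile_eq_drop (p : Char → Bool) (l : List Char) :
    l.dropWhile p = l.drop (l.takeWhile p).length := by
  induction l with
  | nil => rfl
  | cons x xs ih =>
    by_cases h : p x <;> simp [List.takeWhile_cons, h, ih]

theorem rdrop_take (p : Char → Bool) (l : List Char) :
    l.rdropWhile p = l.take (l.length - (l.reverse.takeWhile p).length) := by
  show (l.reverse.dropWhile p).reverse = _
  rw [my_dropWhile_eq_drop, List.reverse_drop]
  simp

theorem takeWhile_take_of_lt (p : Char → Bool) (l : List Char) (m : Nat)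
    (h : (l.takeWhile p).length < m) : (l.take m).takeWhile p = l.takeWhile p := by
  induction l generalizing m with
  | nil => simp
  | cons x xs ih =>
    cases m with
    | zero => exact absurd h (Nat.not_lt_zero _)
    | succ m =>
      by_cases hx : p x
      · simp only [List.takeWhile_cons, hx, if_true, List.length_cons] at h
        simp [List.take_succ_cons, hx, ih m (by omega)]
      · simp [List.take_succ_cons, hx]

theorem first_alpha_spec (l : List Char) (hany : l.any PySem.Chars.isalpha = true) :
    ∃ h : (l.takeWhile (fun c => !PySem.Chars.isalpha c)).length < l.length,
      PySem.Chars.isalpha (l[(l.takeWhile (fun c => !PySem.Chars.isalpha c)).length]'h) = true := by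
  have hd : l.dropWhile (fun c => !PySem.Chars.isalpha c) ≠ [] := by
    rw [Ne, List.dropWhile_eq_nil_iff]
    intro hall
    rcases List.any_eq_true.mp hany with ⟨x, hx, hpx⟩
    have := hall x hx
    simp [hpx] at this
  have hhead := List.head_dropWhile_not (fun c => !PySem.Chars.isalpha c) hd
  have hd2 := hd
  rw [my_dropWhile_eq_drop] at hd2
  have hlt : (l.takeWhile (fun c => !PySem.Chars.isalpha c)).length < l.length := by
    by_contra hge
    exact hd2 (List.drop_eq_nil_iff.mpr (by omega))
  refine ⟨hlt, ?_⟩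
  simp only [my_dropWhile_eq_drop] at hhead
  rw [List.head_drop] at hhead
  simpa using hhead

theorem first_lt_sub (l : List Char) (hany : l.any PySem.Chars.isalpha = true) :
    (l.takeWhile (fun c => !PySem.Chars.isalpha c)).length
      < l.length - (l.reverse.takeWhile (fun c => !PySem.Chars.isalpha c)).length := by
  obtain ⟨hs, hps⟩ := first_alpha_spec l hany
  obtain ⟨ht, _⟩ := first_alpha_spec l.reverse (by simpa using hany)
  rw [List.length_reverse] at ht
  by_contra hcon
  rw [Nat.not_lt] at hcon
  have hj : l.length - 1 - (l.takeWhile (fun c => !PySem.Chars.isalpha c)).length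
      < (l.reverse.takeWhile (fun c => !PySem.Chars.isalpha c)).length := by omega
  have hpre := List.takeWhile_prefix (l := l.reverse) (fun c => !PySem.Chars.isalpha c)
  have hmem := List.getElem_mem hj
  have hq := List.mem_takeWhile_imp hmem
  rw [hpre.getElem hj] at hq
  rw [List.getElem_reverse] at hq
  have heq : l.length - 1 - (l.length - 1 - (l.takeWhile (fun c => !PySem.Chars.isalpha c)).length)
      = (l.takeWhile (fun c => !PySem.Chars.isalpha c)).length := by omega
  simp only [heq] at hq
  rw [hps] at hq
  simp at hq

theorem peel_eq_take_drop (l : List Char) (hany : l.any PySem.Chars.isalpha = true) :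
    pvPeelFront (pvPeelBack l)
      = (l.drop (l.takeWhile (fun c => !PySem.Chars.isalpha c)).length).take
          (l.length - (l.reverse.takeWhile (fun c => !PySem.Chars.isalpha c)).length
            - (l.takeWhile (fun c => !PySem.Chars.isalpha c)).length) := by
  rw [pvPeelBack_eq, rdrop_take, pvPeelFront_eq, my_dropWhile_eq_drop,
    takeWhile_take_of_lt _ _ _ (first_lt_sub l hany), List.drop_take]

theorem takeWhile_nil_of_head (l : List Char) (h : l ≠ [])
    (hp : PySem.Chars.isalpha (l.head h) = true) :
    l.takeWhile (fun c => !PySem.Chars.isalpha c) = [] := by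
  cases l with
  | nil => exact absurd rfl h
  | cons c rest =>
    simp only [List.head_cons] at hp
    simp [hp]

-- ===== VERDICT (by name: the statement is the Claim_ definition above) =====
theorem GetBasicWord_spec : Claim_equal_GetBasicWord := by
  intro str _hdom _hpre
  unfold Spec_GetBasicWord GetBasicWord GetBasicWord_alt
  by_cases hany : str.toList.any PySem.Chars.isalpha
  case neg =>
    have hf : pvFoldAlpha str.toList = false := by
      rw [pvFoldAlpha_eq]; simpa using hany
    rw [if_pos hf]
    have hall : ∀ x ∈ PySem.Chars.lower str.toList, (!PySem.Chars.isalpha x) = true := by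
      intro x hx
      have : (PySem.Chars.lower str.toList).any PySem.Chars.isalpha = false := by
        rw [any_lower]; simpa using hany
      rw [List.any_eq_false] at this
      simpa using this x hx
    rw [pvPeelBack_eq, List.rdropWhile_eq_nil_iff.mpr hall]
    simp [pvPeelFront]
  case pos =>
    have hf : ¬(pvFoldAlpha str.toList = false) := by
      rw [pvFoldAlpha_eq]; simp [hany]
    rw [if_neg hf]
    have hanyl : (PySem.Chars.lower str.toList).any PySem.Chars.isalpha = true := by
      rw [any_lower]; exact hany
    generalize hls : PySem.Chars.lower str.toList = ls at *
    have hne : ls ≠ [] := by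
      intro h; rw [h] at hanyl; simp at hanyl
    have hn : 0 < ls.length := List.length_pos_iff.mpr hne
    have hn1 : ls.length - 1 < ls.length := by omega
    have h0 : PySem.List.pyGet? ls 0 = some (ls[0]'hn) := by
      have hi : PySem.List.pyIdx? ls.length 0 = some 0 := by
        simp [PySem.List.pyIdx?]; omega
      simp [PySem.List.pyGet?, hi, List.getElem?_eq_getElem hn]
    have h1 : PySem.List.pyGet? ls (-1) = some (ls[ls.length - 1]'hn1) := by
      have hi : PySem.List.pyIdx? ls.length (-1) = some (ls.length - 1) := by
        simp [PySem.List.pyIdx?]; omega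
      simp [PySem.List.pyGet?, hi, List.getElem?_eq_getElem hn1]
    dsimp only
    rw [h0, h1]
    have hstn := first_lt_sub ls hanyl
    have ht_lt : (ls.reverse.takeWhile (fun c => !PySem.Chars.isalpha c)).length < ls.length := by
      obtain ⟨ht, _⟩ := first_alpha_spec ls.reverse (by simpa using hanyl)
      simpa using ht
    have hBword := peel_eq_take_drop ls hanyl
    have hshow : (match some (ls[0]'hn), some (ls[ls.length - 1]'hn1) with
        | some c0, some c1 =>
          if (!(PySem.Chars.isalpha c0 && PySem.Chars.isalpha c1)) = true then
            (match pvFirstAlpha ls 0, pvLastAlpha ls (ls.length - 1) with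
              | some iStart, some iEnd => some (String.ofList (PySem.List.slice ls (some (iStart:Int)) (some ((iEnd:Int) + 1))))
              | _, _ => none)
          else some (String.ofList ls)
        | _, _ => (none : Option String))
        = (if (!(PySem.Chars.isalpha (ls[0]'hn) && PySem.Chars.isalpha (ls[ls.length - 1]'hn1))) = true then
            (match pvFirstAlpha ls 0, pvLastAlpha ls (ls.length - 1) with
              | some iStart, some iEnd => some (String.ofList (PySem.List.slice ls (some (iStart:Int)) (some ((iEnd:Int) + 1))))
              | _, _ => none)
          else some (String.ofList ls)) := rfl
    rw [hshow]
    by_cases hc : (PySem.Chars.isalpha (ls[0]'hn) && PySem.Chars.isalpha (ls[ls.length - 1]'hn1)) = true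
    · -- no shaving: first and last characters are letters
      rw [hc]
      simp only [Bool.not_true, if_neg (by exact Bool.false_ne_true)]
      obtain ⟨hca, hcb⟩ := Bool.and_eq_true_iff.mp hc
      have hs0 : (ls.takeWhile (fun c => !PySem.Chars.isalpha c)).length = 0 := by
        rw [takeWhile_nil_of_head ls hne (by rwa [List.head_eq_getElem])]
        rfl
      have hrne : ls.reverse ≠ [] := by simpa using hne
      have ht0 : (ls.reverse.takeWhile (fun c => !PySem.Chars.isalpha c)).length = 0 := by
        rw [takeWhile_nil_of_head ls.reverse hrne ?_]
        · rfl
        · rw [List.head_reverse, List.getLast_eq_getElem]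
          exact hcb
      rw [hBword, hs0, ht0]
      simp only [Nat.sub_zero, List.drop_zero, List.take_length]
      rw [if_neg hne]
    · -- shaving branch
      have hc' : (PySem.Chars.isalpha (ls[0]'hn) && PySem.Chars.isalpha (ls[ls.length - 1]'hn1)) = false :=
        Bool.not_eq_true _ ▸ Bool.of_not_eq_true hc
      rw [hc']
      simp only [Bool.not_false]
      rw [if_pos trivial]
      rw [pvFirstAlpha_eq, if_pos hanyl,
        pvLastAlpha_eq ls (ls.length - 1) (by omega)]
      rw [show ls.length - 1 + 1 = ls.length from by omega, List.take_length, if_pos hanyl]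
      dsimp only
      have hcast : ((ls.length - 1 - (ls.reverse.takeWhile (fun c => !PySem.Chars.isalpha c)).length : Nat) : Int) + 1
          = ((ls.length - (ls.reverse.takeWhile (fun c => !PySem.Chars.isalpha c)).length : Nat) : Int) := by
        omega
      rw [hcast, PySem.List.slice_toNat ls (by positivity) (by positivity)]
      simp only [Int.toNat_natCast, Nat.zero_add]
      have hBne : (ls.drop ((ls.takeWhile (fun c => !PySem.Chars.isalpha c)).length)).take
          (ls.length - (ls.reverse.takeWhile (fun c => !PySem.Chars.isalpha c)).length
            - (ls.takeWhile (fun c => !PySem.Chars.isalpha c)).length) ≠ [] := by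
        intro hnil
        have := congrArg List.length hnil
        simp only [List.length_take, List.length_drop, List.length_nil] at this
        omega
      rw [hBword, if_neg hBne]
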